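-- pv_equiv track=rewrite | github.com/Danesh0War/Degree-Exercises | ex3/ex3.py | num_of_orthogonal
-- ===== SOURCE A (Python) =====
-- def inner_product(vec_1, vec_2):
--     """
--     function takes two vectors and returns their product. If vectors length are diff => returns None. If one of the
--     lists is empty => returns 0
--     """
--     res = 0
--     if len(vec_1) != len(vec_2):
--         return None
--     elif len(vec_1) == 0 or len(vec_2) == 0:
--         return 0
--     else:
--         for i in range(len(vec_1)):  # Possible because vectors are of the same num of dimension (len)
--             res += vec_1[i] * vec_2[i]
--     return res
--
-- def num_of_orthogonal(vectors):
--     """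
--     function calculates the number of orthogonal pairs of vectors based on given list of vectors. It uses 2 loops to
--     choose each pair of vectors and compute their inner product. If the product is sero we increase the counter and
--     after finishing the iteration func returns counter
--     """
--     total_orthogonal = 0
--     num_vectors = len(vectors)
--     for i in range(num_vectors):
--         for j in range(i + 1, num_vectors):
--             vectors_product = inner_product(vectors[i], vectors[j])
--             if vectors_product == 0:
--                 total_orthogonal += 1
--
--     return total_orthogonal
-- ===== SOURCE B (Python) =====
-- def num_of_orthogonal(vectors):
--     # Bucket vectors by length first: only equal-length pairs can count
--     # (A returns None for mismatched lengths, which never equals 0).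
--     buckets = {}
--     for v in vectors:
--         buckets.setdefault(len(v), []).append(v)
--     total = 0
--     for group in buckets.values():
--         rest = list(group)
--         while rest:
--             v = rest.pop(0)
--             for w in rest:
--                 if sum(x * y for x, y in zip(v, w)) == 0:
--                     total += 1
--     return total
-- ===== Notes on version B (the rewrite author's own statement) =====
-- stated objective: alternative
-- what changed: B first builds a dict indexing vectors by length, then counts zero-dot pairs only inside each equal-length bucket (dot via zip), instead of A's index-based double loop over all pairs with a length-checking inner_product.
import Mathlib
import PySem

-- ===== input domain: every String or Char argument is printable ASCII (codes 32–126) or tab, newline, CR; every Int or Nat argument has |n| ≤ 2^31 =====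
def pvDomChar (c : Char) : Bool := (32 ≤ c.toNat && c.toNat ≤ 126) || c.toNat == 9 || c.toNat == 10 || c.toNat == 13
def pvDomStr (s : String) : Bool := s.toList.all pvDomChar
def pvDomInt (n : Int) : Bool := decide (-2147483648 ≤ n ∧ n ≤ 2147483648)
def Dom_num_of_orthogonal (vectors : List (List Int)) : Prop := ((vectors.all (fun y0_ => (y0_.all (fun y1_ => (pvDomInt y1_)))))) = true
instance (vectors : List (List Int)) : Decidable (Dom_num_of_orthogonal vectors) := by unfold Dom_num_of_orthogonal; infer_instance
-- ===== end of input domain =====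

-- B indexes the vectors by length in a dict and counts zero-dot pairs inside each equal-length
-- bucket (dot product via zip), instead of A's index-based double loop over all pairs; same result.


-- ===== PORT A =====
-- inner_product: None (= none) on mismatched lengths; 0 on empty; else index-loop sum.
-- vectors[i] inside the loop is always in range, so pyGetD with a dummy default is exact.
def inner_product (vec_1 vec_2 : List Int) : Option Int :=
  if PySem.List.len vec_1 ≠ PySem.List.len vec_2 then none
  else if PySem.List.len vec_1 = 0 ∨ PySem.List.len vec_2 = 0 then some 0
  else some ((PySem.List.pyRange 0 (PySem.List.len vec_1)).foldl
    (fun res i => res + PySem.List.pyGetD vec_1 i 0 * PySem.List.pyGetD vec_2 i 0) 0)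

def num_of_orthogonal (vectors : List (List Int)) : Int :=
  (PySem.List.pyRange 0 (PySem.List.len vectors)).foldl (fun total i =>
    (PySem.List.pyRange (i + 1) (PySem.List.len vectors)).foldl (fun total j =>
      if inner_product (PySem.List.pyGetD vectors i []) (PySem.List.pyGetD vectors j []) == some 0
      then total + 1 else total) total) 0

-- ===== PORT B =====
-- dot: sum(x * y for x, y in zip(v, w))
def dotB (v w : List Int) : Int := (v.zip w).foldl (fun s p => s + p.1 * p.2) 0

-- the inner while loop of Source B: v = rest.pop(0); count w in rest with dot == 0; repeat
def countGroup : List (List Int) → Int → Int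
  | [], total => total
  | v :: rest, total =>
      countGroup rest (rest.foldl (fun t w => if dotB v w == 0 then t + 1 else t) total)

def num_of_orthogonal_alt (vectors : List (List Int)) : Int :=
  let buckets := vectors.foldl
    (fun d v => d.modify (PySem.List.len v) ([] : List (List Int)) (fun g => g ++ [v]))
    (PySem.Dict.empty : PySem.Dict Int (List (List Int)))
  buckets.values.foldl (fun total group => countGroup group total) 0

-- ===== PRECONDITION & SPEC =====
def Spec_num_of_orthogonal (vectors : List (List Int)) (out : Int) : Prop := out = num_of_orthogonal_alt vectors
instance (vectors : List (List Int)) (out : Int) : Decidable (Spec_num_of_orthogonal vectors out) := by unfold Spec_num_of_orthogonal; infer_instance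

-- ===== CLAIM (what is proved, stated in full; the proofs are below) =====
def Claim_equal_num_of_orthogonal : Prop := ∀ (vectors : List (List Int)), Dom_num_of_orthogonal vectors → Spec_num_of_orthogonal vectors (num_of_orthogonal vectors)

-- ===== LEMMAS AND PROOFS =====

-- pair counter: number of (i < j) pairs satisfying p, by structural recursion
def pcP (p : List Int → List Int → Bool) : List (List Int) → Int
  | [] => 0
  | v :: rest => (List.countP (p v) rest : Int) + pcP p rest

def qA (v w : List Int) : Bool := inner_product v w == some 0
def pB (v w : List Int) : Bool := dotB v w == 0

lemma inner_product_of_len_eq (v w : List Int) (h : v.length = w.length) :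
    inner_product v w = some (dotB v w) := by
  unfold inner_product
  rw [if_neg (by simp only [PySem.List.len_eq, ne_eq, Nat.cast_inj]; omega)]
  by_cases h0 : v.length = 0
  · have hv : v = [] := List.eq_nil_of_length_eq_zero h0
    have hw : w = [] := List.eq_nil_of_length_eq_zero (h ▸ h0)
    subst hv; subst hw; simp [dotB]
  · rw [if_neg (by simp only [PySem.List.len_eq, Nat.cast_eq_zero]; omega)]
    have hz : (v.zip w).length = v.length := by simp [List.length_zip, h]
    have hcongr : (PySem.List.pyRange 0 (PySem.List.len v)).foldl
        (fun res i => res + PySem.List.pyGetD v i 0 * PySem.List.pyGetD w i 0) 0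
        = (PySem.List.pyRange 0 (PySem.List.len (v.zip w))).foldl
        (fun res i => (fun s (p : Int × Int) => s + p.1 * p.2) res (PySem.List.pyGetD (v.zip w) i (0, 0))) 0 := by
      rw [show PySem.List.len (v.zip w) = PySem.List.len v by simp [PySem.List.len_eq, hz]]
      refine PySem.List.foldl_congr_mem _ _ _ _ ?_
      intro acc x hx
      rw [PySem.List.mem_pyRange_one] at hx
      have hx1 : x < (v.length : Int) := by rw [PySem.List.len_eq] at hx; exact hx.2
      have hxv : x < ((v.zip w).length : Int) := by omega
      have hxw : x < (w.length : Int) := by omega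
      rw [PySem.List.pyGetD_eq_getElem v 0 hx.1 hx1,
          PySem.List.pyGetD_eq_getElem w 0 hx.1 hxw,
          PySem.List.pyGetD_eq_getElem (v.zip w) (0, 0) hx.1 hxv,
          List.getElem_zip]
    rw [hcongr, PySem.List.foldl_pyRange_pyGetD (v.zip w) ((0 : Int), (0 : Int)) (fun s p => s + p.1 * p.2) 0 le_rfl]
    simp [dotB]

lemma inner_product_of_len_ne (v w : List Int) (h : v.length ≠ w.length) :
    inner_product v w = none := by
  unfold inner_product
  rw [if_pos (by simp [PySem.List.len_eq]; exact_mod_cast h)]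

lemma qA_eq (v w : List Int) : qA v w = (pB v w && (PySem.List.len w == PySem.List.len v)) := by
  by_cases h : v.length = w.length
  · simp [qA, pB, inner_product_of_len_eq v w h, PySem.List.len_eq, h]
  · simp [qA, inner_product_of_len_ne v w h, PySem.List.len_eq]
    intro _; exact fun hc => absurd (by exact_mod_cast hc.symm) h

-- ===== A's double index loop equals the structural pair counter =====

lemma inner_loop_eq (xs : List (List Int)) (a : Nat) (ha : a < xs.length) (total : Int) :
    (PySem.List.pyRange ((a : Int) + 1) (PySem.List.len xs)).foldl (fun total j =>
      if inner_product (PySem.List.pyGetD xs (a : Int) []) (PySem.List.pyGetD xs j []) == some 0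
      then total + 1 else total) total
    = total + (List.countP (qA xs[a]) (xs.drop (a + 1)) : Int) := by
  have hget : PySem.List.pyGetD xs (a : Int) [] = xs[a] := by
    rw [PySem.List.pyGetD_natCast]; exact List.getD_eq_getElem xs [] ha
  rw [hget]
  rw [show ((a : Int) + 1) = ((a + 1 : Nat) : Int) by push_cast; ring]
  rw [PySem.List.foldl_pyRange_pyGetD xs []
      (fun total w => if inner_product xs[a] w == some 0 then total + 1 else total) total
      (by positivity)]
  rw [Int.toNat_natCast]
  exact PySem.List.foldl_count_if (qA xs[a]) (xs.drop (a + 1)) total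

lemma outer_loop_eq (xs : List (List Int)) (k a : Nat) (hk : xs.length - a = k) (total : Int) :
    (PySem.List.pyRange (a : Int) (PySem.List.len xs)).foldl (fun total i =>
      (PySem.List.pyRange (i + 1) (PySem.List.len xs)).foldl (fun total j =>
        if inner_product (PySem.List.pyGetD xs i []) (PySem.List.pyGetD xs j []) == some 0
        then total + 1 else total) total) total
    = total + pcP qA (xs.drop a) := by
  induction k generalizing a total with
  | zero =>
    have ha : xs.length ≤ a := by omega
    rw [PySem.List.pyRange_one_eq_nil (by rw [PySem.List.len_eq]; exact_mod_cast ha)]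
    simp [List.drop_eq_nil_of_le ha, pcP]
  | succ k ih =>
    have ha : a < xs.length := by omega
    rw [PySem.List.pyRange_one_cons (by rw [PySem.List.len_eq]; exact_mod_cast ha)]
    rw [List.foldl_cons, inner_loop_eq xs a ha total]
    rw [show ((a : Int) + 1) = ((a + 1 : Nat) : Int) by push_cast; ring]
    rw [ih (a + 1) (by omega)]
    have hdrop : xs.drop a = xs[a] :: xs.drop (a + 1) := (List.getElem_cons_drop ha).symm
    rw [hdrop]
    show _ = total + ((List.countP (qA xs[a]) (xs.drop (a + 1)) : Int) + pcP qA (xs.drop (a + 1)))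
    ring

lemma A_eq_pcP (xs : List (List Int)) : num_of_orthogonal xs = pcP qA xs := by
  unfold num_of_orthogonal
  have := outer_loop_eq xs xs.length 0 (by omega) 0
  simpa using this

-- ===== B equals the sum over buckets, and the bucket sum equals the pair counter =====

lemma countGroup_eq (g : List (List Int)) (total : Int) :
    countGroup g total = total + pcP pB g := by
  induction g generalizing total with
  | nil => simp [countGroup, pcP]
  | cons v rest ih =>
    rw [countGroup, ih, PySem.List.foldl_count_if (fun w => dotB v w == 0) rest total]
    have hp : List.countP (fun w => dotB v w == 0) rest = List.countP (pB v) rest := rfl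
    rw [hp, pcP]
    ring

-- one distinguished summand in a sum over a nodup list
lemma sum_map_if_single (S : List Int) (a : Int) (c : Int) (g : Int → Int)
    (hnd : S.Nodup) (hmem : a ∈ S) :
    (S.map (fun L => (if L = a then c else 0) + g L)).sum = c + (S.map g).sum := by
  induction S with
  | nil => simp at hmem
  | cons x S ih =>
    rcases List.mem_cons.mp hmem with h | h
    · have hnot : x ∉ S := (List.nodup_cons.mp hnd).1
      simp only [List.map_cons, List.sum_cons]
      rw [← h, if_pos rfl]
      have hrest : (S.map (fun L => (if L = a then c else 0) + g L)).sum = (S.map g).sum := by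
        rw [List.map_congr_left]
        intro y hy
        rw [if_neg (by rintro rfl; rw [← h] at hnot; exact hnot hy), zero_add]
      rw [hrest]; ring
    · have hx : x ≠ a := by rintro rfl; exact (List.nodup_cons.mp hnd).1 h
      simp only [List.map_cons, List.sum_cons, if_neg hx, zero_add]
      rw [ih (List.nodup_cons.mp hnd).2 h]; ring

lemma bridge (S : List Int) (xs : List (List Int)) (hnd : S.Nodup)
    (hcov : ∀ v ∈ xs, PySem.List.len v ∈ S) :
    (S.map (fun L => pcP pB (xs.filter (fun v => PySem.List.len v == L)))).sum = pcP qA xs := by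
  induction xs with
  | nil =>
    simp only [List.filter_nil, pcP]
    exact List.sum_eq_zero (by intro x hx; simp at hx; omega)
  | cons x xs ih =>
    have hx : PySem.List.len x ∈ S := hcov x (List.mem_cons_self)
    have hcov' : ∀ v ∈ xs, PySem.List.len v ∈ S := fun v hv => hcov v (List.mem_cons_of_mem x hv)
    have hterm : ∀ L, pcP pB ((x :: xs).filter (fun v => PySem.List.len v == L))
        = (if L = PySem.List.len x then (List.countP (pB x) (xs.filter (fun v => PySem.List.len v == L)) : Int) else 0)
          + pcP pB (xs.filter (fun v => PySem.List.len v == L)) := by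
      intro L
      by_cases hL : L = PySem.List.len x
      · subst hL
        rw [List.filter_cons_of_pos (by simp)]
        simp [pcP]
      · rw [List.filter_cons_of_neg (by simpa using fun hc => hL hc.symm), if_neg hL, zero_add]
    calc (S.map (fun L => pcP pB ((x :: xs).filter (fun v => PySem.List.len v == L)))).sum
        = (S.map (fun L => (if L = PySem.List.len x then (List.countP (pB x) (xs.filter (fun v => PySem.List.len v == PySem.List.len x)) : Int) else 0)
            + pcP pB (xs.filter (fun v => PySem.List.len v == L)))).sum := by
          apply congrArg; apply List.map_congr_left
          intro L _
          rw [hterm L]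
          rcases eq_or_ne L (PySem.List.len x) with hL | hL
          · subst hL; rfl
          · rw [if_neg hL, if_neg hL]
      _ = (List.countP (pB x) (xs.filter (fun v => PySem.List.len v == PySem.List.len x)) : Int)
            + (S.map (fun L => pcP pB (xs.filter (fun v => PySem.List.len v == L)))).sum :=
          sum_map_if_single S (PySem.List.len x) _ _ hnd hx
      _ = (List.countP (qA x) xs : Int) + pcP qA xs := by
          rw [ih hcov']
          congr 1
          rw [List.countP_filter]
          exact_mod_cast congrArg Nat.cast (List.countP_congr (fun w _ => by rw [qA_eq]))
      _ = pcP qA (x :: xs) := rfl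

lemma B_eq_pcP (xs : List (List Int)) : num_of_orthogonal_alt xs = pcP qA xs := by
  unfold num_of_orthogonal_alt
  simp only []
  set buckets := xs.foldl
    (fun d v => d.modify (PySem.List.len v) ([] : List (List Int)) (fun g => g ++ [v]))
    (PySem.Dict.empty : PySem.Dict Int (List (List Int))) with hbuckets
  have hnd : buckets.keys.Nodup := by
    rw [hbuckets]
    exact PySem.Dict.nodup_keys_foldl_modify_key xs PySem.List.len []
      (fun _ v g => g ++ [v]) PySem.Dict.empty (by rw [PySem.Dict.keys_empty]; exact List.nodup_nil)
  have hkeys : buckets.keys = PySem.Set.update (PySem.Dict.empty (κ := Int) (ν := List (List Int))).keys (xs.map PySem.List.len) := by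
    rw [hbuckets]
    exact PySem.Dict.keys_foldl_modify_key xs PySem.List.len [] (fun _ v g => g ++ [v]) PySem.Dict.empty
  have hgetD : ∀ L, buckets.getD L [] = xs.filter (fun v => PySem.List.len v == L) := by
    intro L
    have hm := List.foldl_map (f := fun v : List Int => (PySem.List.len v, v))
      (g := fun (d : PySem.Dict Int (List (List Int))) (p : Int × List Int) =>
        d.modify p.1 [] (fun g => g ++ [p.2]))
      (l := xs) (init := PySem.Dict.empty)
    beta_reduce at hm
    rw [hbuckets, ← hm, PySem.Dict.getD_foldl_modify_append]
    simp [List.filter_map, Function.comp_def, List.map_map]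
  rw [PySem.Dict.values_eq_map_keys buckets hnd []]
  have : (buckets.keys.map (fun k => buckets.getD k [])).foldl (fun total group => countGroup group total) 0
      = (buckets.keys.map (fun k => buckets.getD k [])).foldl (fun total group => total + pcP pB group) 0 :=
    PySem.List.foldl_congr_mem _ _ _ _ (fun acc g _ => countGroup_eq g acc)
  rw [this, PySem.List.foldl_add, List.map_map]
  rw [← bridge buckets.keys xs hnd (by
    intro v hv
    rw [hkeys, PySem.Set.mem_update]
    exact Or.inr (List.mem_map_of_mem hv))]
  simp only [Function.comp_def, hgetD, zero_add]

-- ===== VERDICT (by name: the statement is the Claim_ definition above) =====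
theorem num_of_orthogonal_spec : Claim_equal_num_of_orthogonal := by
  intro vectors _
  show num_of_orthogonal vectors = num_of_orthogonal_alt vectors
  rw [A_eq_pcP, B_eq_pcP]
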